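-- pv_equiv track=rewrite | github.com/NaturalStupidlty/CharmingSnake | prepare_data.py | remove_licences
-- ===== SOURCE A (Python) =====
-- def remove_licences(text):
--     lines = text.split('\n')
--     output = []
--     license_found = False
--     for i in range(len(lines)):
--         line = lines[i]
--         if not license_found and ('copyright' in line.lower()
--                                   or 'licence' in line.lower()
--                                   or 'licensed' in line.lower()):
--             license_found = True
--             continue
--         elif license_found and not line.startswith('#'):
--             license_found = False
--         elif license_found and line.startswith('#'):
--             continue
--         output.append(line)
--     return '\n'.join(output)
-- ===== SOURCE B (Python) =====
-- def remove_licences(text):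
--     lines = text.split('\n')
--     output = []
--     i = 0
--     n = len(lines)
--     while i < n:
--         low = lines[i].lower()
--         if 'copyright' in low or 'licence' in low or 'licensed' in low:
--             i += 1
--             while i < n and lines[i].startswith('#'):
--                 i += 1
--             if i < n:
--                 output.append(lines[i])
--                 i += 1
--         else:
--             output.append(lines[i])
--             i += 1
--     return '\n'.join(output)
-- ===== Notes on version B (the rewrite author's own statement) =====
-- stated objective: alternative
-- what changed: Replaces A's boolean license_found flag threaded through a single for-loop by an explicit-index outer while loop with a nested inner while loop that consumes each comment block after a trigger line and then appends the block-ending line without re-testing it.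
import Mathlib
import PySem

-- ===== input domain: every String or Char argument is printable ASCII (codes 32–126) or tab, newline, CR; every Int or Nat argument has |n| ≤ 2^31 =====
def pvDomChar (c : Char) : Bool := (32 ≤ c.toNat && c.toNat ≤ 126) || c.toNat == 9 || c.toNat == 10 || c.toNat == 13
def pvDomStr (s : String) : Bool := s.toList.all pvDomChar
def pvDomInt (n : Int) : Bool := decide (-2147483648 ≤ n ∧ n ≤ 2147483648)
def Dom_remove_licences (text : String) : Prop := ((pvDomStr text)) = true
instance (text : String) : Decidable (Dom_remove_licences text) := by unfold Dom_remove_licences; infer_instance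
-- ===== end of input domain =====

-- B replaces A's boolean-flag single pass by an index-style outer loop with an inner
-- loop consuming each '#' comment block (objective: alternative decomposition, same cost).

-- shared trigger test: 'copyright'/'licence'/'licensed' in line.lower()
def pvTrig (line : String) : Bool :=
  PySem.Str.isIn "copyright" (PySem.Str.lower line) ||
  PySem.Str.isIn "licence" (PySem.Str.lower line) ||
  PySem.Str.isIn "licensed" (PySem.Str.lower line)

-- ===== PORT A =====
-- A's for-loop over lines with the license_found flag, branches in source order
def pvLoopA : List String → Bool → List String
  | [], _ => []
  | line :: rest, flag =>
    if !flag && pvTrig line then pvLoopA rest true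
    else if flag && !(PySem.Str.startswith line "#") then line :: pvLoopA rest false
    else if flag && PySem.Str.startswith line "#" then pvLoopA rest flag
    else line :: pvLoopA rest flag

def remove_licences (text : String) : String :=
  PySem.Str.join "\n" (pvLoopA ((PySem.Str.split? text "\n").getD []) false)

-- ===== PORT B =====
-- B's inner 'while i < n and lines[i].startswith("#")' loop
def pvSkipC : List String → List String
  | [] => []
  | l :: rest => if PySem.Str.startswith l "#" then pvSkipC rest else l :: rest

theorem pvSkipC_length : ∀ ls : List String, (pvSkipC ls).length ≤ ls.length
  | [] => le_refl _
  | l :: rest => by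
    simp only [pvSkipC]
    split
    · exact Nat.le_succ_of_le (pvSkipC_length rest)
    · exact le_refl _

-- B's outer while-loop: on a trigger line, skip it, consume the '#' block,
-- then append the block-ending line (if any) without re-testing it
def pvLoopB : List String → List String
  | [] => []
  | l :: rest =>
    if pvTrig l then
      match h : pvSkipC rest with
      | [] => []
      | l2 :: r2 => l2 :: pvLoopB r2
    else l :: pvLoopB rest
termination_by ls => ls.length
decreasing_by
  · have h1 := pvSkipC_length rest
    rw [h] at h1
    simp at h1 ⊢
    omega
  · simp

def remove_licences_alt (text : String) : String :=
  PySem.Str.join "\n" (pvLoopB ((PySem.Str.split? text "\n").getD []))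

-- ===== PRECONDITION & SPEC =====
def Spec_remove_licences (text : String) (out : String) : Prop := out = remove_licences_alt text
instance (text : String) (out : String) : Decidable (Spec_remove_licences text out) := by unfold Spec_remove_licences; infer_instance

-- ===== CLAIM (what is proved, stated in full; the proofs are below) =====
def Claim_equal_remove_licences : Prop := ∀ (text : String), Dom_remove_licences text → Spec_remove_licences text (remove_licences text)

-- ===== LEMMAS AND PROOFS =====

-- A's flag states vs B's loops: flag=false behaves as B's outer loop; flag=true behaves as
-- consuming the '#' block and emitting the block-ending line.
theorem pvLoopB_cons_trig (l : String) (rest : List String) (ht : pvTrig l = true) :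
    pvLoopB (l :: rest) = (match pvSkipC rest with | [] => [] | l2 :: r2 => l2 :: pvLoopB r2) := by
  rw [pvLoopB]
  simp only [ht, if_true]
  cases pvSkipC rest <;> simp

theorem pvLoopB_cons_notrig (l : String) (rest : List String) (ht : pvTrig l = false) :
    pvLoopB (l :: rest) = l :: pvLoopB rest := by
  rw [pvLoopB]
  simp [ht]

-- A's flag states vs B's loops: flag=false behaves as B's outer loop; flag=true behaves as
-- consuming the '#' block and emitting the block-ending line.
theorem pvLoopA_eq_pvLoopB : ∀ ls : List String,
    pvLoopA ls false = pvLoopB ls ∧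
    pvLoopA ls true = (match pvSkipC ls with | [] => [] | l :: r => l :: pvLoopB r)
  | [] => by simp [pvLoopA, pvLoopB, pvSkipC]
  | l :: rest => by
    obtain ⟨ih1, ih2⟩ := pvLoopA_eq_pvLoopB rest
    constructor
    · by_cases ht : pvTrig l
      · rw [pvLoopB_cons_trig l rest ht, ← ih2]
        simp [pvLoopA, ht]
      · rw [pvLoopB_cons_notrig l rest (by simpa using ht)]
        simp [pvLoopA, ht, ih1]
    · by_cases hs : PySem.Str.startswith l "#"
      · simp only [pvLoopA, pvSkipC, hs]
        simpa [hs] using ih2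
      · have hs' : PySem.Chars.startswith l.toList ['#'] = false := by simpa using hs
        simp [pvLoopA, pvSkipC, hs', ih1]

-- ===== VERDICT (by name: the statement is the Claim_ definition above) =====
theorem remove_licences_spec : Claim_equal_remove_licences := by
  intro text _
  unfold Spec_remove_licences remove_licences remove_licences_alt
  rw [(pvLoopA_eq_pvLoopB _).1]
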